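-- pv_equiv track=rewrite | github.com/Kisara-k/utils | md_processing_obsidian/json_to_md.py | json_to_md
-- ===== SOURCE A (Python) =====
-- def json_to_md(data, max_level=4):
--     # Sort hierarchically by headings
--     def sort_key(entry):
--         return tuple(entry.get(f"h{i+1}", "") for i in range(max_level))
--
--     sorted_data = sorted(data, key=sort_key)
--     md_lines = []
--     prev_headings = [""] * max_level
--
--     for entry in sorted_data:
--         # Print only headings that changed
--         for i in range(max_level):
--             h = entry.get(f"h{i+1}", "")
--             if h and h != prev_headings[i]:
--                 for j in range(i, max_level):
--                     prev_headings[j] = ""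
--                 md_lines.append("#" * (i+1) + " " + h)
--                 prev_headings[i] = h
--
--         # Add content exactly as in JSON
--         content = entry.get("content", "")
--         if content:
--             md_lines.append(content)
--
--     # Join lines with a single newline
--     return "\n".join(md_lines)
-- ===== SOURCE B (Python) =====
-- def json_to_md(data, max_level=4):
--     # Group-by-heading tree walk: sort once, then DFS an explicit stack of
--     # (group, depth) frames, splitting each group into the leading run that
--     # shares the heading at its depth and the remaining sibling groups.
--     def key(entry):
--         return [entry.get(f"h{i+1}", "") for i in range(max_level)]
--
--     pairs = [(key(e), e.get("content", "")) for e in sorted(data, key=key)]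
--
--     lines = []
--     stack = [(pairs, 0)]
--     while stack:
--         group, depth = stack.pop()
--         if depth >= max_level:
--             lines.extend(c for _, c in group if c)
--             continue
--         if not group:
--             continue
--         h = group[0][0][depth]
--         j = 1
--         while j < len(group) and group[j][0][depth] == h:
--             j += 1
--         if h:
--             lines.append("#" * (depth + 1) + " " + h)
--         stack.append((group[j:], depth))      # later sibling groups
--         stack.append((group[:j], depth + 1))  # this run, next heading level
--     return "\n".join(lines)
-- ===== Notes on version B (the rewrite author's own statement) =====
-- stated objective: alternative
-- what changed: B replaces A's flat single pass with a mutable prev_headings array and cascade resets by a group-tree walk: it sorts once, builds (key, content) pairs, then DFS-walks an explicit stack of (group, depth) frames, splitting each group into the leading run that shares the heading at its depth (emitting that heading) and the remaining sibling groups.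
import Mathlib
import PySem

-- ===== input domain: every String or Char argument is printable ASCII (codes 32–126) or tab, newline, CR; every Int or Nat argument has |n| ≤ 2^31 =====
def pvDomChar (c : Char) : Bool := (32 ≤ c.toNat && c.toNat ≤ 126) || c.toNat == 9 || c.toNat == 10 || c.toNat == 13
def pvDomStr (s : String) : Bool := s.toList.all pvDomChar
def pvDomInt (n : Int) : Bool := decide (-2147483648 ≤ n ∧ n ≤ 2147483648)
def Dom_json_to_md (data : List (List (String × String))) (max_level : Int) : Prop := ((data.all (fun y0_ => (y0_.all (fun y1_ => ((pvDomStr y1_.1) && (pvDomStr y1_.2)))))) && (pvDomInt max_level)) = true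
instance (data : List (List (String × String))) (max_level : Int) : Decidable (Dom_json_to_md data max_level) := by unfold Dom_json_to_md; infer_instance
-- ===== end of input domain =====

-- B replaces A's flat stateful pass (prev-array with cascade resets) by a recursive
-- divide-and-conquer: sort once, then split the sorted pairs into runs sharing the
-- heading at each depth and recurse per group (objective: alternative decomposition).

-- ===== PORT A =====
-- sort_key closure of A: tuple(entry.get(f"h{i+1}", "") for i in range(max_level))
-- (B's key helper is the identical Python expression, so the definition is shared)
def pvKey (max_level : Int) (e : List (String × String)) : List String :=
  (PySem.List.pyRange 0 max_level).map
    (fun i => (PySem.Dict.ofList e).getD ("h" ++ PySem.Int.toStr (i + 1)) "")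

-- the string "#" * (i+1) + " " + h (identical expression in both Pythons)
def pvHash (i : Int) (h : String) : String :=
  String.ofList (PySem.List.pyRepeat ['#'] (i + 1)) ++ " " ++ h

def json_to_md (data : List (List (String × String))) (max_level : Int) : String :=
  let sorted_data := PySem.List.sorted data (pvKey max_level)
  -- state: (md_lines, prev_headings)
  let st := sorted_data.foldl (fun st entry =>
      let st2 := (PySem.List.pyRange 0 max_level).foldl (fun st i =>
          let h := (PySem.Dict.ofList entry).getD ("h" ++ PySem.Int.toStr (i + 1)) ""
          -- prev_headings[i]: 0 ≤ i < max_level = len(prev_headings), so the index is in range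
          if h ≠ "" ∧ h ≠ PySem.List.pyGetD st.2 i "" then
            -- for j in range(i, max_level): prev_headings[j] = ""   (j ≥ 0, in range)
            let p := (PySem.List.pyRange i max_level).foldl (fun p j => p.set j.toNat "") st.2
            (st.1 ++ [pvHash i h], (p.set i.toNat h))
          else st) st
      let content := (PySem.Dict.ofList entry).getD "content" ""
      if content ≠ "" then (st2.1 ++ [content], st2.2) else st2)
    (([] : List String), PySem.List.pyRepeat [""] max_level)
  PySem.Str.join "\n" st.1

-- ===== PORT B =====
-- measure lemma cited by pvLoop's decreasing_by (the DFS stack loop terminates)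
theorem pv_loop_meas (r s S t st : Nat) (hr : 1 ≤ r) :
    2 * (r * t + (s * (t + 1) + S)) + (st + 1 + 1) < 2 * ((r + s) * (t + 1) + S) + (st + 1) := by
  have h1 : (r + s) * (t + 1) = r * t + r + s * (t + 1) := by ring
  rw [h1]
  have h2 : 0 ≤ r * t := Nat.zero_le _
  omega

-- the while loop over the explicit stack of (group, depth) frames; Python's
-- stack.pop()/append at the end become head/cons (the head is the top of the
-- stack); group[0][0][depth] is in range whenever that branch is reached
-- (depth < max_level = len(key)); the while scan for j → takeWhile/dropWhile.
def pvLoop (ml : Int) (stack : List (List (List String × String) × Nat)) (lines : List String) :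
    List String :=
  match stack with
  | [] => lines
  | (group, depth) :: stack =>
    if ml ≤ (depth : Int) then
      pvLoop ml stack (lines ++ (group.filter (fun p => p.2 ≠ "")).map (fun p => p.2))
    else
      match group with
      | [] => pvLoop ml stack lines
      | p :: rest =>
        let h := PySem.List.pyGetD p.1 (depth : Int) ""
        pvLoop ml
          ((p :: rest.takeWhile (fun q => PySem.List.pyGetD q.1 (depth : Int) "" == h), depth + 1) ::
            (rest.dropWhile (fun q => PySem.List.pyGetD q.1 (depth : Int) "" == h), depth) :: stack)
          (lines ++ (if h ≠ "" then [pvHash (depth : Int) h] else []))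
  termination_by (2 * (stack.map (fun f => f.1.length * (ml.toNat - f.2 + 1))).sum + stack.length, 0)
  decreasing_by
  · apply Prod.Lex.left
    have h2 : group.length * (ml.toNat - depth + 1) ≥ 0 := Nat.zero_le _
    simp only [List.map_cons, List.sum_cons, List.length_cons]
    omega
  · apply Prod.Lex.left
    simp only [List.map_cons, List.sum_cons, List.length_cons]
    omega
  · apply Prod.Lex.left
    simp only [List.map_cons, List.sum_cons, List.length_cons]
    have hd : depth < ml.toNat := by omega
    have hsum : (rest.takeWhile (fun q : List String × String => PySem.List.pyGetD q.1 (depth : Int) "" == PySem.List.pyGetD p.1 (depth : Int) "")).length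
        + (rest.dropWhile (fun q : List String × String => PySem.List.pyGetD q.1 (depth : Int) "" == PySem.List.pyGetD p.1 (depth : Int) "")).length = rest.length := by
      rw [← List.length_append, List.takeWhile_append_dropWhile]
    set r := (rest.takeWhile (fun q : List String × String => PySem.List.pyGetD q.1 (depth : Int) "" == PySem.List.pyGetD p.1 (depth : Int) "")).length + 1
    set sdw := (rest.dropWhile (fun q : List String × String => PySem.List.pyGetD q.1 (depth : Int) "" == PySem.List.pyGetD p.1 (depth : Int) "")).length
    have e1 : ml.toNat - (depth + 1) + 1 = ml.toNat - depth - 1 + 1 := by omega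
    have e2 : ml.toNat - depth + 1 = ml.toNat - depth - 1 + 1 + 1 := by omega
    have hL2 : rest.length + 1 = r + sdw := by omega
    rw [e1, e2, hL2]
    exact pv_loop_meas r sdw _ (ml.toNat - depth - 1 + 1) _ (by omega)

def json_to_md_alt (data : List (List (String × String))) (max_level : Int) : String :=
  let pairs := (PySem.List.sorted data (pvKey max_level)).map
      (fun e => (pvKey max_level e, (PySem.Dict.ofList e).getD "content" ""))
  PySem.Str.join "\n" (pvLoop max_level [(pairs, 0)] [])

-- ===== PRECONDITION & SPEC =====
def Spec_json_to_md (data : List (List (String × String))) (max_level : Int) (out : String) : Prop :=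
  out = json_to_md_alt data max_level
instance (data : List (List (String × String))) (max_level : Int) (out : String) :
    Decidable (Spec_json_to_md data max_level out) := by unfold Spec_json_to_md; infer_instance

-- ===== CLAIM =====
def Claim_equal_json_to_md : Prop :=
  ∀ (data : List (List (String × String))) (max_level : Int),
    Dom_json_to_md data max_level → Spec_json_to_md data max_level (json_to_md data max_level)

-- ===== LEMMAS AND PROOFS =====

-- ---- proof-side definitions ----

-- the dict lookup A and B both perform for heading level j (0-based)
def pvDG (e : List (String × String)) (j : Nat) : String :=
  (PySem.Dict.ofList e).getD ("h" ++ PySem.Int.toStr ((j : Int) + 1)) ""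

-- headings emitted for levels in [m, t)
def emitSeg (k : List String) (m t : Nat) : List String :=
  ((List.range' m (t - m)).filter (fun i => decide (k.getD i "" ≠ ""))).map
    (fun (i : Nat) => pvHash (i : Int) (k.getD i ""))

-- common prefix length of two key lists
def pvCpl : List String → List String → Nat
  | p :: ps, k :: ks => if k = p then pvCpl ps ks + 1 else 0
  | _, _ => 0

-- per-entry heading emission relative to the previous key
def pvEmit (prev key : List String) : List String :=
  emitSeg key (pvCpl prev key) key.length

-- A's prev_headings array after the first t levels of an entry with key k (previous key p, common prefix m)
def prevAt (p k : List String) (n m t : Nat) : List String :=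
  if t ≤ m then p else k.take t ++ List.replicate (n - t) ""

-- reference line sequence: per entry, headings past the common prefix with the previous key, then content
def pvF : List String → List (List String × String) → List String
  | _, [] => []
  | p, (k, c) :: rest => (pvEmit p k ++ (if c ≠ "" then [c] else [])) ++ pvF k rest

def pvPairs (ml : Int) (l : List (List (String × String))) : List (List String × String) :=
  l.map (fun e => (pvKey ml e, (PySem.Dict.ofList e).getD "content" ""))

-- key of the last entry of a list (default p)
def pvLastK : List String → List (List String × String) → List String
  | p, [] => p
  | _, (k, _) :: rest => pvLastK k rest

-- ---- the two sort instances on List String agree ----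

theorem pv_sortedBridge {α : Type} (xs : List α) (key : α → List String) :
    PySem.List.sorted xs key =
    @PySem.List.sorted α (List String) List.instLinearOrder.toLT LinearOrder.toDecidableLT xs key false := by
  unfold PySem.List.sorted
  simp only [Bool.false_eq_true, if_false]
  congr 1
  funext acc x
  congr 1
  funext a b
  exact decide_eq_decide.mpr (List.lt_iff_lex_lt _ _)

theorem pv_sorted_pairwise {α : Type} (xs : List α) (key : α → List String) :
    List.Pairwise (fun a b => key a ≤ key b) (PySem.List.sorted xs key) := by
  rw [pv_sortedBridge]; exact PySem.List.sorted_pairwise xs key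

-- ---- pyRange over Nat bounds ----

theorem pv_range_nil {a b : Int} (h : b ≤ a) : PySem.List.pyRange a b = [] := by
  rw [PySem.List.pyRange_of_pos a b one_pos, if_neg (by omega)]
  simp

theorem pv_range'_cast (a b : Nat) :
    PySem.List.pyRange (a : Int) (b : Int) = (List.range' a (b - a)).map (fun (j : Nat) => (j : Int)) := by
  rcases Nat.le_total b a with h | h
  · rw [pv_range_nil (by exact_mod_cast h)]
    simp [Nat.sub_eq_zero_of_le h]
  · rw [PySem.List.pyRange_of_pos _ _ one_pos]
    rcases Nat.eq_or_lt_of_le h with h' | h'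
    · subst h'; simp
    · rw [if_pos (by exact_mod_cast h')]
      have h2 : (((b : Int) - a + 1 - 1) / 1).toNat = b - a := by omega
      rw [h2, List.range'_eq_map_range]
      simp only [List.map_map]
      refine List.map_congr_left ?_
      intro k _
      simp

theorem pv_range0 (ml : Int) :
    PySem.List.pyRange 0 ml = (List.range ml.toNat).map (fun (j : Nat) => (j : Int)) := by
  by_cases h : ml ≤ 0
  · rw [pv_range_nil h]
    simp [Int.toNat_of_nonpos h]
  · have h1 : ml = ((ml.toNat : Nat) : Int) := by omega
    rw [h1, show ((0:Int)) = ((0:Nat):Int) from rfl, pv_range'_cast]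
    simp only [List.range'_eq_map_range, Nat.sub_zero, Int.toNat_natCast, List.map_map]
    refine List.map_congr_left ?_
    intro k _
    simp

theorem pv_range_cons {t : Nat} {ml : Int} (h : (t:Int) < ml) :
    PySem.List.pyRange (t : Int) ml = (t:Int) :: PySem.List.pyRange ((t+1 : Nat) : Int) ml := by
  rw [PySem.List.pyRange_one_cons h]
  push_cast
  rfl

-- ---- the sort key ----

theorem pv_key_eq (ml : Int) (e : List (String × String)) :
    pvKey ml e = (List.range ml.toNat).map (pvDG e) := by
  rw [pvKey, pv_range0, List.map_map]
  rfl

theorem pv_key_length (ml : Int) (e : List (String × String)) :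
    (pvKey ml e).length = ml.toNat := by
  rw [pv_key_eq]; simp

theorem pv_key_getD (ml : Int) (e : List (String × String)) {t : Nat} (h : t < ml.toNat) :
    (pvKey ml e).getD t "" = pvDG e t := by
  rw [pv_key_eq]
  rw [List.getD_eq_getElem?_getD, List.getElem?_map, List.getElem?_range h]
  rfl

-- ---- common-prefix-length facts ----

theorem pv_cpl_le (p k : List String) : pvCpl p k ≤ k.length := by
  induction p generalizing k with
  | nil => cases k <;> simp [pvCpl]
  | cons a ps ih =>
    cases k with
    | nil => simp [pvCpl]
    | cons b ks =>
      by_cases h : b = a <;> simp [pvCpl, h]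
      exact ih ks

theorem pv_cpl_take (p k : List String) : p.take (pvCpl p k) = k.take (pvCpl p k) := by
  induction p generalizing k with
  | nil => cases k <;> simp [pvCpl]
  | cons a ps ih =>
    cases k with
    | nil => simp [pvCpl]
    | cons b ks =>
      by_cases h : b = a <;> simp [pvCpl, h]
      exact ih ks

theorem pv_cpl_self (p : List String) : pvCpl p p = p.length := by
  induction p with
  | nil => simp [pvCpl]
  | cons a ps ih => simp [pvCpl, ih]

theorem pv_cpl_agree (p k : List String) {j : Nat} (h : j < pvCpl p k) :
    p.getD j "" = k.getD j "" := by
  induction p generalizing k j with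
  | nil => cases k <;> simp [pvCpl] at h
  | cons a ps ih =>
    cases k with
    | nil => simp [pvCpl] at h
    | cons b ks =>
      by_cases hb : b = a
      · subst hb
        cases j with
        | zero => rfl
        | succ j =>
          rw [show pvCpl (b :: ps) (b :: ks) = pvCpl ps ks + 1 from by simp [pvCpl]] at h
          simpa using ih ks (by omega)
      · simp [pvCpl, hb] at h

theorem pv_cpl_ge (p k : List String) (t : Nat) (hp : t ≤ p.length) (hk : t ≤ k.length)
    (h : p.take t = k.take t) : t ≤ pvCpl p k := by
  induction t generalizing p k with
  | zero => omega
  | succ t ih =>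
    cases p with
    | nil => simp at hp
    | cons a ps =>
      cases k with
      | nil => simp at hk
      | cons b ks =>
        simp only [List.take_succ_cons, List.cons.injEq] at h
        have hba : b = a := h.1.symm
        simp only [pvCpl, if_pos hba]
        have := ih ps ks (by simpa using hp) (by simpa using hk) h.2
        omega

theorem pv_cpl_le_of_ne (p k : List String) {d : Nat} (h : p.getD d "" ≠ k.getD d "") :
    pvCpl p k ≤ d := by
  by_contra hlt
  exact h (pv_cpl_agree p k (by omega))

-- ---- emitSeg facts ----

theorem pv_emitSeg_head (k : List String) {d n' : Nat} (h : d < n') :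
    emitSeg k d n' =
      (if k.getD d "" ≠ "" then [pvHash (d : Int) (k.getD d "")] else []) ++ emitSeg k (d+1) n' := by
  unfold emitSeg
  rw [show n' - d = (n' - (d+1)) + 1 by omega, List.range'_succ, List.filter_cons]
  by_cases hk : k.getD d "" = "" <;> simp [List.getD] at hk ⊢ <;> simp [hk]

theorem pv_emitSeg_skip (k : List String) {d m : Nat} (n' : Nat) (hdm : d ≤ m)
    (hz : ∀ j, d ≤ j → j < m → k.getD j "" = "") : emitSeg k d n' = emitSeg k m n' := by
  unfold emitSeg
  rcases Nat.le_total m n' with hmn | hmn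
  · rw [show n' - d = (m - d) + (n' - m) by omega, ← List.range'_append_1]
    rw [List.filter_append, show d + (m - d) = m by omega]
    have hnil : (List.range' d (m - d)).filter (fun i => decide (k.getD i "" ≠ "")) = [] := by
      rw [List.filter_eq_nil_iff]
      intro a ha
      rw [List.mem_range'_1] at ha
      have h2 := hz a ha.1 (by omega)
      simp [List.getD] at h2
      simp [h2]
    rw [hnil, List.nil_append]
  · have h1 : (List.range' d (n' - d)).filter (fun i => decide (k.getD i "" ≠ "")) = [] := by
      rw [List.filter_eq_nil_iff]
      intro a ha
      rw [List.mem_range'_1] at ha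
      have h2 := hz a ha.1 (by omega)
      simp [List.getD] at h2
      simp [h2]
    rw [h1, show n' - m = 0 by omega]
    simp

theorem pv_emitSeg_empty (k : List String) (m : Nat) : emitSeg k m m = by exact [] := by
  unfold emitSeg
  simp

-- ---- pvF facts ----

theorem pvF_cons (p k : List String) (c : String) (rest : List (List String × String)) :
    pvF p ((k, c) :: rest) =
      emitSeg k (pvCpl p k) k.length ++ ((if c ≠ "" then [c] else []) ++ pvF k rest) := by
  simp [pvF, pvEmit]

theorem pvF_append (p : List String) (xs ys : List (List String × String)) :
    pvF p (xs ++ ys) = pvF p xs ++ pvF (pvLastK p xs) ys := by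
  induction xs generalizing p with
  | nil => simp [pvF, pvLastK]
  | cons q xs ih =>
    obtain ⟨k, c⟩ := q
    rw [List.cons_append, pvF_cons, pvF_cons, ih k]
    simp [pvLastK]

theorem pvLastK_mem (p : List String) (l : List (List String × String)) (h : l ≠ []) :
    ∃ q ∈ l, pvLastK p l = q.1 := by
  induction l generalizing p with
  | nil => exact absurd rfl h
  | cons q rest ih =>
    cases rest with
    | nil => exact ⟨q, by simp [pvLastK]⟩
    | cons r rs =>
      obtain ⟨q', hq', he⟩ := ih q.1 (by simp)
      exact ⟨q', by simp [hq'], by simpa [pvLastK] using he⟩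

theorem pv_dropWhile_head {α : Type} (pr : α → Bool) (l : List α) (x : α) (xs : List α)
    (h : l.dropWhile pr = x :: xs) : pr x = false := by
  induction l with
  | nil => simp [List.dropWhile] at h
  | cons a as ih =>
    rw [List.dropWhile_cons] at h
    by_cases hp : pr a = true
    · rw [if_pos hp] at h
      exact ih h
    · rw [if_neg hp] at h
      cases h
      simpa using hp

-- ---- base case of the main lemma: all keys equal prev, only contents remain ----

theorem pv_base (prev : List String) (pairs : List (List String × String))
    (heq : ∀ p ∈ pairs, p.1 = prev) :
    pvF prev pairs = (pairs.filter (fun p => p.2 ≠ "")).map (fun p => p.2) := by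
  induction pairs with
  | nil => simp [pvF]
  | cons q rest ih =>
    obtain ⟨k, c⟩ := q
    have hk : k = prev := heq (k, c) (by simp)
    subst hk
    rw [pvF_cons, pv_cpl_self, pv_emitSeg_empty, List.nil_append,
        ih (fun p hp => heq p (by simp [hp])), List.filter_cons]
    by_cases hc : c = "" <;> simp [hc]

theorem pv_take_succ_getD (k : List String) {t : Nat} (ht : t < k.length) :
    k.take (t + 1) = k.take t ++ [k.getD t ""] := by
  rw [List.take_succ, List.getElem?_eq_getElem ht]
  simp [List.getD_eq_getElem?_getD, List.getElem?_eq_getElem ht]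

-- proof-side recursive form of one stack frame: the lines pvLoop produces for it
def pvRender (ml : Int) (depth : Nat) (pairs : List (List String × String)) : List String :=
  if ml ≤ (depth : Int) then ((pairs.filter (fun p => p.2 ≠ "")).map (fun p => p.2))
  else
    match pairs with
    | [] => []
    | p :: rest =>
      let h := PySem.List.pyGetD p.1 (depth : Int) ""
      (if h ≠ "" then [pvHash (depth : Int) h] else []) ++
        pvRender ml (depth + 1) (p :: rest.takeWhile (fun q => PySem.List.pyGetD q.1 (depth : Int) "" == h)) ++
        pvRender ml depth (rest.dropWhile (fun q => PySem.List.pyGetD q.1 (depth : Int) "" == h))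
  termination_by (ml.toNat - depth, pairs.length)
  decreasing_by
  · apply Prod.Lex.left
    omega
  · apply Prod.Lex.right
    have := List.length_dropWhile_le (fun q : List String × String => PySem.List.pyGetD q.1 (depth : Int) "" == PySem.List.pyGetD p.1 (depth : Int) "") rest
    simp only [List.length_cons]
    omega


theorem pvRender_nil (ml : Int) (d : Nat) : pvRender ml d [] = [] := by
  rw [pvRender]
  split <;> rfl

theorem pv_getD_drop_rep (prev : List String) (n d j : Nat) (_hlen : prev.length = n)
    (hd : prev.drop d = List.replicate (n - d) "") (hj : d ≤ j) : prev.getD j "" = "" := by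
  rw [List.getD_eq_getElem?_getD, show j = d + (j - d) by omega, ← List.getElem?_drop, hd]
  rcases Nat.lt_or_ge (j - d) (n - d) with h | h
  · rw [List.getElem?_replicate, if_pos h]
    rfl
  · rw [List.getElem?_eq_none (by simp; omega)]
    rfl

-- ---- main lemma: pvF = pvRender on sorted, length-n keyed pairs ----

theorem pv_main (ml : Int) (fuel : Nat) :
    ∀ (d : Nat) (prev : List String) (pairs : List (List String × String)),
      ml.toNat - d + pairs.length ≤ fuel →
      prev.length = ml.toNat →
      (∀ p ∈ pairs, p.1.length = ml.toNat) →
      List.Pairwise (fun a b => a.1 ≤ b.1) pairs →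
      (∀ p ∈ pairs, ∀ q ∈ pairs, p.1.take d = q.1.take d) →
      (∀ k c rest, pairs = (k, c) :: rest →
        prev.take d = k.take d ∧
        (prev.getD d "" ≠ k.getD d "" ∨ prev.drop d = List.replicate (ml.toNat - d) "")) →
      pvF prev pairs = pvRender ml d pairs := by
  induction fuel with
  | zero =>
    intro d prev pairs hf _ _ _ _ _
    have hp0 : pairs = [] := by
      cases pairs with
      | nil => rfl
      | cons a l => simp at hf
    subst hp0
    rw [pvRender_nil]
    rfl
  | succ fuel ih =>
    intro d prev pairs hf hprev hkl hpw hshare hhead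
    by_cases hbase : ml ≤ (d : Int)
    · rw [pvRender.eq_def, if_pos hbase]
      apply pv_base
      intro p hp
      cases pairs with
      | nil => cases hp
      | cons q rest =>
        obtain ⟨k0, c0⟩ := q
        have hnd : ml.toNat ≤ d := by omega
        have h1 := (hhead k0 c0 rest rfl).1
        have hk0len : k0.length = ml.toNat := hkl (k0, c0) (by simp)
        have hprevp : prev.take d = prev := List.take_of_length_le (by omega)
        have hk0p : k0.take d = k0 := List.take_of_length_le (by omega)
        have hpk : prev = k0 := by rw [← hprevp, ← hk0p, h1]
        have h2 := hshare p hp (k0, c0) (by simp)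
        have hplen : p.1.length = ml.toNat := hkl p hp
        have hpp : p.1.take d = p.1 := List.take_of_length_le (by omega)
        rw [hpp, hk0p] at h2
        rw [h2, ← hpk]
    · have hd : d < ml.toNat := by omega
      cases pairs with
      | nil => rw [pvRender_nil]; rfl
      | cons q rest =>
        obtain ⟨k0, c0⟩ := q
        rw [pvRender.eq_def, if_neg hbase]
        dsimp only []
        simp only [PySem.List.pyGetD_natCast]
        have hk0mem : ((k0, c0) : List String × String) ∈ (k0, c0) :: rest := by simp
        have hk0n : k0.length = ml.toNat := hkl _ hk0mem
        have htakeh := (hhead k0 c0 rest rfl).1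
        have hdisj := (hhead k0 c0 rest rfl).2
        set n := ml.toNat with hn
        set pr := (fun q : List String × String => q.1.getD d "" == k0.getD d "") with hpr
        set tw := rest.takeWhile pr with htw
        set dw := rest.dropWhile pr with hdw
        set run := ((k0, c0) : List String × String) :: tw with hrun
        have hrest : tw ++ dw = rest := List.takeWhile_append_dropWhile
        have hrunsub : run.Sublist ((k0, c0) :: rest) :=
          List.Sublist.cons₂ _ (List.takeWhile_sublist pr)
        have hdwsub : dw.Sublist ((k0, c0) :: rest) :=
          List.Sublist.cons _ (List.dropWhile_sublist pr)
        have hrun_mem : ∀ p ∈ run, p ∈ (k0, c0) :: rest := fun p hp => hrunsub.mem hp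
        have hdw_mem : ∀ p ∈ dw, p ∈ (k0, c0) :: rest := fun p hp => hdwsub.mem hp
        have hrun_d : ∀ p ∈ run, p.1.getD d "" = k0.getD d "" := by
          intro p hp
          rcases List.mem_cons.mp hp with he | htwm
          · rw [he]
          · have := List.mem_takeWhile_imp htwm
            rw [hpr] at this
            exact of_decide_eq_true (by simpa using this)
        -- the initial prev used for the run at depth d+1
        set prev' := k0.take (d + 1) ++ List.replicate (n - (d + 1)) "" with hprev'
        have hd1n : d + 1 ≤ n := by omega
        have hkt1 : (k0.take (d + 1)).length = d + 1 := List.length_take_of_le (by omega)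
        have hprev'len : prev'.length = n := by
          rw [hprev', List.length_append, hkt1, List.length_replicate]
          omega
        have hprev'take : prev'.take (d + 1) = k0.take (d + 1) := by
          rw [hprev', List.take_append, hkt1, Nat.sub_self, List.take_take, min_self,
              List.take_replicate]
          simp
        have hprev'drop : prev'.drop (d + 1) = List.replicate (n - (d + 1)) "" := by
          rw [hprev', List.drop_append, hkt1, Nat.sub_self, List.drop_take, Nat.sub_self,
              List.take_zero, List.drop_replicate]
          simp
        have htake1 : ∀ p ∈ run, p.1.take (d + 1) = k0.take (d + 1) := by
          intro p hp
          have hl : p.1.length = n := hkl p (hrun_mem p hp)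
          rw [pv_take_succ_getD p.1 (by omega), pv_take_succ_getD k0 (by omega),
              hshare p (hrun_mem p hp) (k0, c0) hk0mem, hrun_d p hp]
        -- IH for the run at depth d+1
        have ihrun : pvF prev' run = pvRender ml (d + 1) run := by
          apply ih (d + 1) prev' run
          · have h1 : tw.length ≤ rest.length := (List.takeWhile_sublist pr).length_le
            rw [hrun]
            simp only [List.length_cons]
            simp only [List.length_cons] at hf
            omega
          · exact hprev'len
          · exact fun p hp => hkl p (hrun_mem p hp)
          · exact hpw.sublist hrunsub
          · intro p hp q hq
            rw [htake1 p hp, htake1 q hq]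
          · rintro k c r he
            rw [hrun] at he
            injection he with he1 he2
            injection he1 with hek hec
            subst hek
            exact ⟨hprev'take, Or.inr (by rw [hprev'drop])⟩
        -- the key of the last entry of the run
        obtain ⟨qq, hqqmem, hqqeq⟩ := pvLastK_mem prev run (by rw [hrun]; simp)
        have hpk_mem : qq ∈ (k0, c0) :: rest := hrun_mem qq hqqmem
        have hpk_len : (pvLastK prev run).length = n := by rw [hqqeq]; exact hkl qq hpk_mem
        have hpk_d : (pvLastK prev run).getD d "" = k0.getD d "" := by rw [hqqeq]; exact hrun_d qq hqqmem
        -- IH for the remainder at depth d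
        have ihdw : pvF (pvLastK prev run) dw = pvRender ml d dw := by
          apply ih d (pvLastK prev run) dw
          · have h1 : dw.length ≤ rest.length := List.length_dropWhile_le pr rest
            simp only [List.length_cons] at hf
            omega
          · exact hpk_len
          · exact fun p hp => hkl p (hdw_mem p hp)
          · exact hpw.sublist hdwsub
          · intro p hp q hq
            exact hshare p (hdw_mem p hp) q (hdw_mem q hq)
          · rintro k c r he
            constructor
            · rw [hqqeq]
              exact hshare qq hpk_mem (k, c) (hdw_mem (k, c) (by rw [he]; simp))
            · left
              rw [hpk_d]
              have hfalse : pr (k, c) = false := pv_dropWhile_head pr rest (k, c) r (by rw [← hdw, he])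
              rw [hpr] at hfalse
              intro hcontra
              
              exact (of_decide_eq_false (by simpa using hfalse)) hcontra.symm
        -- the three emitSeg identities
        have hge : d ≤ pvCpl prev k0 :=
          pv_cpl_ge prev k0 d (by omega) (by omega) htakeh
        have heq1 : emitSeg k0 (pvCpl prev k0) n = emitSeg k0 d n := by
          rcases hdisj with hne | hdropz
          · have hle := pv_cpl_le_of_ne prev k0 hne
            rw [show pvCpl prev k0 = d by omega]
          · refine (pv_emitSeg_skip k0 n hge ?_).symm
            intro j hj1 hj2
            have hcl : pvCpl prev k0 ≤ k0.length := pv_cpl_le prev k0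
            rw [← pv_cpl_agree prev k0 (by omega)]
            exact pv_getD_drop_rep prev n d j hprev hdropz hj1
        have hge' : d + 1 ≤ pvCpl prev' k0 :=
          pv_cpl_ge prev' k0 (d + 1) (by omega) (by omega) hprev'take
        have heq3 : emitSeg k0 (pvCpl prev' k0) n = emitSeg k0 (d + 1) n := by
          refine (pv_emitSeg_skip k0 n hge' ?_).symm
          intro j hj1 hj2
          have hcl : pvCpl prev' k0 ≤ k0.length := pv_cpl_le prev' k0
          rw [← pv_cpl_agree prev' k0 (by omega)]
          exact pv_getD_drop_rep prev' n (d + 1) j hprev'len hprev'drop hj1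
        have heq2 : emitSeg k0 d n =
            (if k0.getD d "" ≠ "" then [pvHash (d : Int) (k0.getD d "")] else []) ++
              emitSeg k0 (d + 1) n := pv_emitSeg_head k0 (by omega)
        -- assemble
        have hsplit : pvF prev ((k0, c0) :: rest) = pvF prev run ++ pvF (pvLastK prev run) dw := by
          conv_lhs => rw [show ((k0, c0) :: rest : List (List String × String)) = run ++ dw by
            rw [hrun, List.cons_append, hrest]]
          rw [pvF_append]
        rw [hsplit, ← ihdw]
        rw [← ihrun]
        rw [pvF_cons prev k0 c0 tw, pvF_cons prev' k0 c0 tw, hk0n, heq1, heq3, heq2]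
        simp [List.append_assoc]

theorem pv_attach_cm {α β : Type} (l : List α) (f : α → β) (p : α → Bool) :
    (l.attach.filter (fun x => p x.1)).map (fun x => f x.1) = (l.filter p).map f := by
  induction l with
  | nil => rfl
  | cons a t ih =>
    rw [List.attach_cons, List.filter_cons, List.filter_cons]
    by_cases hp : p a <;>
      simp only [hp, List.filter_map, List.map_map] <;>
      simp [Function.comp, ih]

-- the stack loop produces, frame by frame, the recursive per-frame lines
theorem pvLoop_spec (ml : Int) (stack : List (List (List String × String) × Nat)) (lines : List String) :
    pvLoop ml stack lines = lines ++ (stack.map (fun f => pvRender ml f.2 f.1)).flatten := by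
  induction stack, lines using pvLoop.induct ml with
  | case1 lines => simp [pvLoop]
  | case2 lines group depth stack hle ih =>
    simp at ih
    rw [pv_attach_cm group (fun q => q.2) (fun q => !decide (q.2 = ""))] at ih
    rw [pvLoop.eq_def]
    dsimp only []
    rw [if_pos hle]
    simp only [decide_not]
    rw [ih]
    simp only [List.map_cons, List.flatten_cons]
    conv_rhs => rw [pvRender.eq_def]
    rw [if_pos hle]
    simp [decide_not]
  | case3 lines depth stack hle ih =>
    rw [pvLoop.eq_def]
    dsimp only []
    rw [if_neg hle, ih]
    simp [pvRender_nil]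
  | case4 lines depth stack hne phead ptail hstr ihr =>
    rw [show hstr = PySem.List.pyGetD phead.1 ((depth : Nat) : Int) "" from rfl] at ihr
    simp only [dite_eq_ite] at ihr
    rw [pvLoop.eq_def]
    dsimp only []
    rw [if_neg hne]
    rw [ihr]
    simp only [List.map_cons, List.flatten_cons]
    conv_rhs => rw [pvRender.eq_def]
    rw [if_neg hne]
    dsimp only []
    simp [List.append_assoc]

-- ---- A equals the reference sequence (the flat stateful pass) ----

theorem pv_not_lt_empty (s : String) : ¬ s < "" := by
  intro h
  rw [String.lt_iff_toList_lt] at h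
  exact (List.not_lt_nil _) h

theorem pv_replicate_le (k : List String) : List.replicate k.length "" ≤ k := by
  induction k with
  | nil => simp
  | cons a ks ih =>
    simp only [List.length_cons, List.replicate_succ]
    by_cases h : ("" : String) = a
    · subst h
      exact List.cons_le_cons "" ih
    · have hlt : ("" : String) < a := by
        rcases lt_trichotomy ("" : String) a with h' | h' | h'
        · exact h'
        · exact absurd h' h
        · exact absurd h' (pv_not_lt_empty a)
      exact le_of_lt ((List.lt_iff_lex_lt _ _).mpr (List.Lex.rel hlt))

theorem pv_emitSeg_stop (k : List String) {m t : Nat} (h : t ≤ m) : emitSeg k m t = [] := by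
  unfold emitSeg
  rw [Nat.sub_eq_zero_of_le h]
  simp

theorem pv_emitSeg_succ (k : List String) {m t : Nat} (h : m ≤ t) :
    emitSeg k m (t + 1) =
      emitSeg k m t ++ (if k.getD t "" ≠ "" then [pvHash (t : Int) (k.getD t "")] else []) := by
  unfold emitSeg
  rw [show t + 1 - m = (t - m) + 1 by omega, List.range'_concat,
      show m + 1 * (t - m) = t by omega, List.filter_append, List.map_append]
  by_cases hk : k.getD t "" = "" <;> simp [List.getD] at hk ⊢ <;> simp [hk]

theorem pv_le_lex (p k : List String) (h : p ≤ k) :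
    p = k ∨ List.Lex (· < ·) p k := by
  rcases lt_or_eq_of_le h with h' | h'
  · right
    exact (List.lt_iff_lex_lt p k).mp h'
  · left; exact h'

theorem pv_lex_getD (p k : List String) (h : List.Lex (· < ·) p k)
    (hlen : p.length = k.length) (hm : pvCpl p k < k.length) :
    p.getD (pvCpl p k) "" < k.getD (pvCpl p k) "" := by
  induction h with
  | nil => simp at hlen
  | rel hab =>
    rename_i a l b l'
    have hba : ¬ (b = a) := fun he => absurd he.symm (ne_of_lt hab)
    simp only [pvCpl, if_neg hba, List.getD_cons_zero]
    exact hab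
  | cons h ih =>
    rename_i a as bs
    rw [show pvCpl (a :: as) (a :: bs) = pvCpl as bs + 1 from by simp [pvCpl]] at hm ⊢
    simp only [List.length_cons] at hlen hm
    simp only [List.getD_cons_succ]
    exact ih (by omega) (by omega)

theorem pv_cpl_order (p k : List String) (hlen : p.length = k.length) (hle : p ≤ k)
    (hm : pvCpl p k < k.length) :
    p.getD (pvCpl p k) "" < k.getD (pvCpl p k) "" := by
  rcases pv_le_lex p k hle with h | h
  · subst h
    rw [pv_cpl_self] at hm
    omega
  · exact pv_lex_getD p k h hlen hm

-- ---- the reset loop ----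

theorem pv_set_take {q : List String} {t : Nat} (h : t < q.length) (s : String) :
    (q.set t s).take (t + 1) = q.take t ++ [s] := by
  rw [List.set_eq_take_append_cons_drop, if_pos h, List.take_append]
  have h1 : (q.take t).length = t := List.length_take_of_le (le_of_lt h)
  rw [h1, show t + 1 - t = 1 by omega]
  simp

theorem pv_resetFold (ml : Int) (fuel : Nat) :
    ∀ (t : Nat) (q : List String), q.length = ml.toNat → ml.toNat - t ≤ fuel → t ≤ ml.toNat →
    (PySem.List.pyRange (t : Int) ml).foldl (fun p j => p.set j.toNat "") q =
      q.take t ++ List.replicate (ml.toNat - t) "" := by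
  induction fuel with
  | zero =>
    intro t q hq hf ht
    rw [pv_range_nil (by omega)]
    have ht' : t = ml.toNat := by omega
    subst ht'
    simp [← hq]
  | succ fuel ih =>
    intro t q hq hf ht
    rcases Nat.eq_or_lt_of_le ht with he | hlt
    · rw [pv_range_nil (by omega)]
      subst he
      simp [← hq]
    · rw [pv_range_cons (by omega), List.foldl_cons]
      have hset : ((t:Int).toNat) = t := by omega
      rw [hset]
      rw [ih (t+1) (q.set t "") (by simpa using hq) (by omega) (by omega)]
      rw [pv_set_take (by omega) ""]
      rw [List.append_assoc]
      congr 1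
      rw [show ml.toNat - t = (ml.toNat - (t+1)) + 1 by omega]
      simp [List.replicate_succ]

-- ---- the inner (per-entry) loop of A ----

theorem pv_prevAt_le {p k : List String} {n m t : Nat} (h : t ≤ m) : prevAt p k n m t = p :=
  if_pos h

theorem pv_prevAt_gt {p k : List String} {n m t : Nat} (h : m < t) :
    prevAt p k n m t = k.take t ++ List.replicate (n - t) "" :=
  if_neg (by omega)

theorem pv_set_mid (k : List String) {n t : Nat} (hkl : k.length = n) (ht : t < n) (h : String) :
    ((k.take t ++ List.replicate (n - t) "").set t h) =
      k.take t ++ h :: List.replicate (n - (t+1)) "" := by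
  have hlt : (k.take t).length = t := List.length_take_of_le (by omega)
  rw [List.set_append, if_neg (by omega), hlt, Nat.sub_self,
      show n - t = (n - (t+1)) + 1 by omega, List.replicate_succ, List.set_cons_zero]

theorem pv_inner_aux (ml : Int) (e : List (String × String)) (p : List String) (lines0 : List String)
    (m : Nat) (hp : p.length = ml.toNat) (hm_take : p.take m = (pvKey ml e).take m)
    (hmn : m ≤ ml.toNat)
    (hord : m < ml.toNat → p.getD m "" < (pvKey ml e).getD m "")
    (fuel : Nat) :
    ∀ t : Nat, ml.toNat - t ≤ fuel → t ≤ ml.toNat →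
    (PySem.List.pyRange (t : Int) ml).foldl (fun st i =>
        let h := (PySem.Dict.ofList e).getD ("h" ++ PySem.Int.toStr (i + 1)) ""
        if h ≠ "" ∧ h ≠ PySem.List.pyGetD st.2 i "" then
          let q := (PySem.List.pyRange i ml).foldl (fun p j => p.set j.toNat "") st.2
          (st.1 ++ [pvHash i h], (q.set i.toNat h))
        else st)
      (lines0 ++ emitSeg (pvKey ml e) m t, prevAt p (pvKey ml e) ml.toNat m t) =
      (lines0 ++ emitSeg (pvKey ml e) m ml.toNat, pvKey ml e) := by
  set n := ml.toNat with hn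
  set k := pvKey ml e with hk
  have hkl : k.length = n := pv_key_length ml e
  have hmeq : m = n → p = k := by
    intro he
    have h1 := hm_take
    rw [he, ← hp, List.take_length] at h1
    rw [hp, ← hkl, List.take_length] at h1
    exact h1
  have hlast : prevAt p k n m n = k := by
    rcases Nat.eq_or_lt_of_le hmn with he | hlt
    · rw [pv_prevAt_le (le_of_eq he.symm), hmeq he]
    · rw [pv_prevAt_gt hlt, ← hkl, List.take_length, hkl, Nat.sub_self]
      simp
  induction fuel with
  | zero =>
    intro t hf ht
    have ht' : t = n := by omega
    rw [pv_range_nil (by omega)]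
    subst ht'
    rw [hlast]
    rfl
  | succ fuel ih =>
    intro t hf ht
    rcases Nat.eq_or_lt_of_le ht with he | hlt
    · rw [pv_range_nil (by omega)]
      subst he
      rw [hlast]
      rfl
    · -- one step at level t
      rw [pv_range_cons (by omega), List.foldl_cons]
      have hDG : (PySem.Dict.ofList e).getD ("h" ++ PySem.Int.toStr ((t : Int) + 1)) "" = k.getD t "" :=
        (pv_key_getD ml e (by omega)).symm
      have htt : ((t : Int)).toNat = t := by omega
      have hstep : (fun (st : List String × List String) (i : Int) =>
          let h := (PySem.Dict.ofList e).getD ("h" ++ PySem.Int.toStr (i + 1)) ""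
          if h ≠ "" ∧ h ≠ PySem.List.pyGetD st.2 i "" then
            let q := (PySem.List.pyRange i ml).foldl (fun p j => p.set j.toNat "") st.2
            (st.1 ++ [pvHash i h], (q.set i.toNat h))
          else st)
          (lines0 ++ emitSeg k m t, prevAt p k n m t) (t : Int) =
          (lines0 ++ emitSeg k m (t+1), prevAt p k n m (t+1)) := by
        dsimp only []
        rw [hDG]
        rcases Nat.lt_trichotomy t m with hcase | hcase | hcase
        · -- t < m : key agrees with prev, branch not taken, nothing emitted
          rw [pv_prevAt_le (le_of_lt hcase), pv_prevAt_le (by omega)]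
          have hgd : p.getD t "" = k.getD t "" := by
            have h1 := congrArg (fun l => l.getD t "") hm_take
            simpa [List.getD_eq_getElem?_getD, List.getElem?_take_of_lt, hcase] using h1
          rw [PySem.List.pyGetD_natCast, hgd, if_neg (by simp)]
          rw [pv_emitSeg_stop k (by omega), pv_emitSeg_stop k (by omega)]
        · -- t = m : first changed level; heading emitted, prev tail reset
          subst hcase
          rw [pv_prevAt_le (le_refl t), pv_prevAt_gt (by omega)]
          have hord' := hord (by omega)
          have hne : k.getD t "" ≠ "" := by
            intro he
            rw [he] at hord'
            exact pv_not_lt_empty _ hord'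
          have hnp : k.getD t "" ≠ p.getD t "" := (ne_of_lt hord').symm
          rw [PySem.List.pyGetD_natCast, if_pos ⟨hne, hnp⟩]
          rw [pv_resetFold ml n t p hp (by omega) (by omega), htt, hm_take,
          pv_set_mid k hkl (by omega) _]
          rw [pv_emitSeg_succ k (le_refl t), if_pos hne,
              pv_take_succ_getD k (by omega)]
          simp
        · -- m < t : prev[t] is already "", heading emitted iff nonempty
          rw [pv_prevAt_gt hcase, pv_prevAt_gt (by omega)]
          have hgd0 : (k.take t ++ List.replicate (n - t) "").getD t "" = "" := by
            have hlt2 : (k.take t).length = t := List.length_take_of_le (by omega)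
            rw [List.getD_eq_getElem?_getD, List.getElem?_append_right (by omega), hlt2,
                Nat.sub_self]
            rcases Nat.lt_or_ge 0 (n - t) with h0 | h0
            · rw [List.getElem?_replicate, if_pos h0]
              rfl
            · rw [List.getElem?_eq_none (by simp; omega)]
              rfl
          rw [PySem.List.pyGetD_natCast, hgd0]
          by_cases hne : k.getD t "" = ""
          · rw [if_neg (by rw [hne]; simp)]
            rw [pv_emitSeg_succ k (by omega), if_neg (by rw [hne]; simp), List.append_nil,
                pv_take_succ_getD k (by omega), hne]
            simp [show n - t = (n - (t+1)) + 1 by omega, List.replicate_succ]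
          · rw [if_pos ⟨hne, hne⟩]
            have hlen2 : (k.take t ++ List.replicate (n - t) "").length = n := by
              simp [List.length_take, hkl]
              omega
            rw [pv_resetFold ml n t _ hlen2 (by omega) (by omega), htt]
            have htake : (k.take t ++ List.replicate (n - t) "").take t = k.take t := by
              rw [List.take_append, List.take_take,
                  show min t t = t from min_self t,
                  List.length_take_of_le (by omega), Nat.sub_self]
              simp
            rw [htake, pv_set_mid k hkl (by omega) _]
            rw [pv_emitSeg_succ k (by omega), if_pos hne,
                pv_take_succ_getD k (by omega)]
            simp
      exact Eq.trans
        (congrArg (fun s => List.foldl (fun (st : List String × List String) (i : Int) =>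
            let h := (PySem.Dict.ofList e).getD ("h" ++ PySem.Int.toStr (i + 1)) ""
            if h ≠ "" ∧ h ≠ PySem.List.pyGetD st.2 i "" then
              let q := (PySem.List.pyRange i ml).foldl (fun p j => p.set j.toNat "") st.2
              (st.1 ++ [pvHash i h], (q.set i.toNat h))
            else st) s (PySem.List.pyRange ((t+1 : Nat) : Int) ml)) hstep)
        (ih (t+1) (by omega) (by omega))

theorem pv_inner (ml : Int) (e : List (String × String)) (p : List String) (lines : List String)
    (hp : p.length = ml.toNat) (hle : p ≤ pvKey ml e) :
    (PySem.List.pyRange 0 ml).foldl (fun st i =>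
        let h := (PySem.Dict.ofList e).getD ("h" ++ PySem.Int.toStr (i + 1)) ""
        if h ≠ "" ∧ h ≠ PySem.List.pyGetD st.2 i "" then
          let q := (PySem.List.pyRange i ml).foldl (fun p j => p.set j.toNat "") st.2
          (st.1 ++ [pvHash i h], (q.set i.toNat h))
        else st) (lines, p) =
      (lines ++ pvEmit p (pvKey ml e), pvKey ml e) := by
  have hkl := pv_key_length ml e
  have hlen : p.length = (pvKey ml e).length := by rw [hkl, hp]
  have h0 := pv_inner_aux ml e p lines (pvCpl p (pvKey ml e)) hp
    (pv_cpl_take p (pvKey ml e))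
    (by rw [← hkl]; exact pv_cpl_le p (pvKey ml e))
    (fun hlt => pv_cpl_order p (pvKey ml e) hlen hle (by omega))
    ml.toNat 0 (by omega) (by omega)
  rw [show ((0:Int)) = (((0:Nat)):Int) from rfl]
  rw [pv_emitSeg_stop _ (Nat.zero_le _), List.append_nil,
      pv_prevAt_le (Nat.zero_le _)] at h0
  rw [pvEmit, hkl]
  exact h0

theorem pv_outer (ml : Int) (l : List (List (String × String))) :
    ∀ (p : List String) (lines : List String), p.length = ml.toNat →
      (∀ e ∈ l, p ≤ pvKey ml e) →
      List.Pairwise (fun a b => pvKey ml a ≤ pvKey ml b) l →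
      (l.foldl (fun st entry =>
          let st2 := (PySem.List.pyRange 0 ml).foldl (fun st i =>
              let h := (PySem.Dict.ofList entry).getD ("h" ++ PySem.Int.toStr (i + 1)) ""
              if h ≠ "" ∧ h ≠ PySem.List.pyGetD st.2 i "" then
                let q := (PySem.List.pyRange i ml).foldl (fun p j => p.set j.toNat "") st.2
                (st.1 ++ [pvHash i h], (q.set i.toNat h))
              else st) st
          let content := (PySem.Dict.ofList entry).getD "content" ""
          if content ≠ "" then (st2.1 ++ [content], st2.2) else st2) (lines, p)).1 =
        lines ++ pvF p (pvPairs ml l) := by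
  induction l with
  | nil =>
    intro p lines _ _ _
    simp [pvF, pvPairs]
  | cons e rest ih =>
    intro p lines hp hle hpw
    rw [List.foldl_cons]
    have hstate : (fun (st : List String × List String) entry =>
        let st2 := (PySem.List.pyRange 0 ml).foldl (fun st i =>
            let h := (PySem.Dict.ofList entry).getD ("h" ++ PySem.Int.toStr (i + 1)) ""
            if h ≠ "" ∧ h ≠ PySem.List.pyGetD st.2 i "" then
              let q := (PySem.List.pyRange i ml).foldl (fun p j => p.set j.toNat "") st.2
              (st.1 ++ [pvHash i h], (q.set i.toNat h))
            else st) st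
        let content := (PySem.Dict.ofList entry).getD "content" ""
        if content ≠ "" then (st2.1 ++ [content], st2.2) else st2) (lines, p) e =
        (lines ++ (pvEmit p (pvKey ml e) ++
            (if (PySem.Dict.ofList e).getD "content" "" ≠ ""
             then [(PySem.Dict.ofList e).getD "content" ""] else [])), pvKey ml e) := by
      dsimp only []
      rw [pv_inner ml e p lines hp (hle e (List.mem_cons_self ..))]
      by_cases hc : (PySem.Dict.ofList e).getD "content" "" = "" <;>
        simp [hc]
    refine Eq.trans (congrArg (fun s => (List.foldl (fun (st : List String × List String) entry =>
        let st2 := (PySem.List.pyRange 0 ml).foldl (fun st i =>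
            let h := (PySem.Dict.ofList entry).getD ("h" ++ PySem.Int.toStr (i + 1)) ""
            if h ≠ "" ∧ h ≠ PySem.List.pyGetD st.2 i "" then
              let q := (PySem.List.pyRange i ml).foldl (fun p j => p.set j.toNat "") st.2
              (st.1 ++ [pvHash i h], (q.set i.toNat h))
            else st) st
        let content := (PySem.Dict.ofList entry).getD "content" ""
        if content ≠ "" then (st2.1 ++ [content], st2.2) else st2) s rest).1) hstate) ?_
    dsimp only []
    rw [ih (pvKey ml e) _ (pv_key_length ml e)
          (fun e' he' => (List.pairwise_cons.mp hpw).1 e' he')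
          (List.pairwise_cons.mp hpw).2]
    simp [pvPairs, pvF, List.append_assoc]

-- ===== VERDICT =====
theorem json_to_md_spec : Claim_equal_json_to_md := by
  intro data ml _
  show json_to_md data ml = json_to_md_alt data ml
  unfold json_to_md json_to_md_alt
  dsimp only []
  have hp : (PySem.List.pyRepeat [""] ml).length = ml.toNat := by
    rw [PySem.List.pyRepeat_singleton]; simp
  have hle : ∀ e ∈ PySem.List.sorted data (pvKey ml),
      PySem.List.pyRepeat [""] ml ≤ pvKey ml e := by
    intro e _
    rw [PySem.List.pyRepeat_singleton]
    have h := pv_replicate_le (pvKey ml e)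
    rwa [pv_key_length] at h
  rw [pv_outer ml (PySem.List.sorted data (pvKey ml)) _ [] hp hle
        (pv_sorted_pairwise data (pvKey ml))]
  have hpairs : (PySem.List.sorted data (pvKey ml)).map
      (fun e => (pvKey ml e, (PySem.Dict.ofList e).getD "content" "")) =
      pvPairs ml (PySem.List.sorted data (pvKey ml)) := rfl
  rw [hpairs, pvLoop_spec]
  simp only [List.map_cons, List.map_nil, List.flatten_cons, List.flatten_nil,
    List.nil_append, List.append_nil]
  congr 1
  apply pv_main ml (ml.toNat + (pvPairs ml (PySem.List.sorted data (pvKey ml))).length)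
  · omega
  · rw [PySem.List.pyRepeat_singleton]; simp
  · intro p hp
    rw [pvPairs] at hp
    obtain ⟨e, _, he⟩ := List.mem_map.mp hp
    rw [← he]
    exact pv_key_length ml e
  · rw [pvPairs]
    rw [List.pairwise_map]
    exact pv_sorted_pairwise data (pvKey ml)
  · intro p _ q _
    simp
  · intro k c rest hpr
    refine ⟨by simp, Or.inr ?_⟩
    rw [PySem.List.pyRepeat_singleton]
    simp
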